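-- pv_equiv track=rewrite | github.com/dbiro/AdventOfCode_2018 | AOC_Python/Day02/day02_part1.py | scanId
-- ===== SOURCE A (Python) =====
-- def scanId(id):
--     occurenceOfChars = dict()
--     for c in id:
--         if not c in occurenceOfChars:
--             occurenceOfChars[c] = 1
--         else:
--             occurenceOfChars[c] += 1
--     hasTwos = any(v == 2 for v in occurenceOfChars.values())
--     hasThrees = any(v == 3 for v in occurenceOfChars.values())
--     return (hasTwos, hasThrees)
-- ===== SOURCE B (Python) =====
-- def scanId(id):
--     # Repeated partitioning: take the first remaining character as pivot,
--     # split off all its occurrences (their number is the pivot's count),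
--     # and continue on the remainder.  No dict and no value scans.
--     s = list(id)
--     has2 = False
--     has3 = False
--     while s:
--         c = s[0]
--         rest = [x for x in s if x != c]
--         k = len(s) - len(rest)
--         has2 = has2 or k == 2
--         has3 = has3 or k == 3
--         s = rest
--     return (has2, has3)
-- ===== Notes on version B (the rewrite author's own statement) =====
-- stated objective: alternative
-- what changed: Replaces the dict-counting pass plus two any(...) scans over the dict values by repeated partitioning: pick the first remaining character as pivot, filter out all its occurrences (the length drop is its count), set the 2/3 flags on the fly, and loop on the remainder - no dictionary and no value scan exist in B.
import Mathlib
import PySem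

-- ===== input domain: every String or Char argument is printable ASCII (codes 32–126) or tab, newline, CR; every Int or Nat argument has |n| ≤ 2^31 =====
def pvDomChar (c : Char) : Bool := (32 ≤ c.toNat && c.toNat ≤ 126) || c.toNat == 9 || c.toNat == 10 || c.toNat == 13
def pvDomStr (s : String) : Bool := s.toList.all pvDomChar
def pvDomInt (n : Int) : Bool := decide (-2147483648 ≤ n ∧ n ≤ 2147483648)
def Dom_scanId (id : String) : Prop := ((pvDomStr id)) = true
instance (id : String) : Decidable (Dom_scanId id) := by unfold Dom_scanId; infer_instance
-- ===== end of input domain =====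

-- B replaces A's dict-counting pass plus two any(...) value scans by repeated
-- partitioning on the first remaining character (the length drop of the filter
-- is that character's count); an alternative algorithm, not claimed faster.

-- ===== PORT A =====
def scanId (id : String) : Bool × Bool :=
  -- 'for c in id: if c not in occ: occ[c]=1 else: occ[c]+=1'
  -- (occ[c] += 1 reads occ[c]; it exists in that branch, so getD 0 is exact)
  let occ : PySem.Dict Char Int :=
    id.toList.foldl
      (fun d c => if !(d.contains c) then d.insert c 1 else d.insert c (d.getD c 0 + 1))
      PySem.Dict.empty
  let hasTwos := occ.values.any (fun v => v == (2 : Int))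
  let hasThrees := occ.values.any (fun v => v == (3 : Int))
  (hasTwos, hasThrees)

-- ===== PORT B =====
-- the while loop of Source B: state (s, has2, has3); each round partitions s on s[0]
def scanIdGo : List Char → Bool → Bool → Bool × Bool
  | [], h2, h3 => (h2, h3)
  | c :: t, h2, h3 =>
      let rest := (c :: t).filter (fun x => x != c)
      let k := (c :: t).length - rest.length
      scanIdGo rest (h2 || (k == 2)) (h3 || (k == 3))
termination_by s _ _ => s.length
decreasing_by
  simp only [List.filter_cons, bne_self_eq_false, Bool.false_eq_true, if_false]
  exact Nat.lt_succ_of_le (List.length_filter_le _ _)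

def scanId_alt (id : String) : Bool × Bool :=
  scanIdGo id.toList false false

-- ===== PRECONDITION & SPEC =====
def Spec_scanId (id : String) (out : Bool × Bool) : Prop := out = scanId_alt id
instance (id : String) (out : Bool × Bool) : Decidable (Spec_scanId id out) := by unfold Spec_scanId; infer_instance

-- ===== CLAIM (what is proved, stated in full; the proofs are below) =====
def Claim_equal_scanId : Prop := ∀ (id : String), Dom_scanId id → Spec_scanId id (scanId id)

-- ===== LEMMAS AND PROOFS =====

-- A's branchy counting step is the counting step of PySem.Dict.counter.
lemma scanId_occ_eq_counter (xs : List Char) :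
    xs.foldl
      (fun d c => if !(d.contains c) then d.insert c 1 else d.insert c (d.getD c 0 + 1))
      PySem.Dict.empty = PySem.Dict.counter xs := by
  rw [← PySem.Dict.foldl_insert_getD_add_one_eq_counter]
  congr 1
  funext d c
  by_cases h : d.contains c = true
  · simp [h]
  · simp only [Bool.not_eq_true] at h
    rw [PySem.Dict.getD_of_not_contains d 0 h]
    simp [h]

-- A's value scan for n is "some character occurs exactly n times"
lemma scanId_any_eq (xs : List Char) (n : Int) :
    ((PySem.Dict.counter xs).values.any (fun v => v == n)) =
      decide (∃ c ∈ xs, (xs.count c : Int) = n) := by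
  rw [PySem.Dict.values_eq_map_keys _ (PySem.Dict.nodup_keys_counter xs) 0,
      PySem.Dict.keys_counter]
  rcases h : (((PySem.Set.ofList xs : List Char).map
      (fun k => (PySem.Dict.counter xs).getD k 0)).any (fun v => v == n)) with _ | _
  · simp only [List.any_eq_false, List.mem_map, beq_iff_eq] at h
    symm
    simp only [decide_eq_false_iff_not]
    rintro ⟨c, hc, hn⟩
    exact h _ ⟨c, (PySem.Set.mem_ofList _ _).mpr hc, rfl⟩ ((PySem.Dict.getD_counter xs c) ▸ hn)
  · rcases List.any_eq_true.mp h with ⟨v, hv, he⟩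
    rcases List.mem_map.mp hv with ⟨c, hc, rfl⟩
    symm
    simp only [decide_eq_true_eq]
    refine ⟨c, (PySem.Set.mem_ofList _ _).mp hc, ?_⟩
    rw [← PySem.Dict.getD_counter xs c]
    exact beq_iff_eq.mp he

-- the filter's length drop is the pivot's count
lemma length_sub_filter (c : Char) (s : List Char) :
    s.length - (s.filter (fun x => x != c)).length = s.count c := by
  have key : (s.filter (fun x => x != c)).length + s.count c = s.length := by
    induction s with
    | nil => simp
    | cons a t ih =>
      by_cases ha : a = c
      · subst ha
        simp only [List.filter_cons, bne_self_eq_false, Bool.false_eq_true, if_false,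
          List.count_cons_self, List.length_cons]
        omega
      · have hb : (a != c) = true := by simp [bne, ha]
        have hcnt : (a :: t).count c = t.count c := by
          simp [ha]
        simp only [List.filter_cons, hb, if_true, List.length_cons, hcnt]
        omega
  omega

-- counts of other characters survive the partition step
lemma count_filter_ne (s : List Char) (c d : Char) (hd : d ≠ c) :
    (s.filter (fun x => x != c)).count d = s.count d := by
  induction s with
  | nil => rfl
  | cons a t ih =>
    by_cases ha : a = c
    · subst ha
      simp [ih, (Ne.symm hd)]
    · have hb : (a != c) = true := by simp [bne, ha]
      simp [hb, List.count_cons, ih]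

-- decide distributes over ∨ (used to merge the pivot test with the recursive flags)
lemma decide_or_eq_or_decide (P Q : Prop) [Decidable P] [Decidable Q] :
    decide (P ∨ Q) = (decide P || decide Q) := by
  by_cases hP : P <;> by_cases hQ : Q <;> simp [hP, hQ]

-- loop invariant: scanIdGo ORs into the flags "some char of s has count 2 / 3"
lemma scanIdGo_eq (s : List Char) (h2 h3 : Bool) :
    scanIdGo s h2 h3 =
      (h2 || decide (∃ c ∈ s, s.count c = 2),
       h3 || decide (∃ c ∈ s, s.count c = 3)) := by
  induction hl : s.length using Nat.strong_induction_on generalizing s h2 h3 with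
  | _ n ih =>
    cases s with
    | nil => simp [scanIdGo]
    | cons c t =>
      rw [scanIdGo]
      have hrest : ((c :: t).filter (fun x => x != c)).length < n := by
        subst hl
        simp only [List.filter_cons, bne_self_eq_false, Bool.false_eq_true, if_false]
        exact Nat.lt_succ_of_le (List.length_filter_le _ _)
      rw [ih _ hrest _ _ _ rfl]
      have hmem : ∀ k, (∃ d ∈ (c :: t), (c :: t).count d = k) ↔
          ((c :: t).count c = k ∨ ∃ d ∈ (c :: t).filter (fun x => x != c),
            ((c :: t).filter (fun x => x != c)).count d = k) := by
        intro k
        constructor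
        · rintro ⟨d, hdm, hdc⟩
          by_cases hdc' : d = c
          · exact Or.inl (hdc' ▸ hdc)
          · refine Or.inr ⟨d, List.mem_filter.mpr ⟨hdm, by simp [bne, hdc']⟩, ?_⟩
            rw [count_filter_ne _ _ _ hdc']; exact hdc
        · rintro (h | ⟨d, hdm, hdc⟩)
          · exact ⟨c, List.mem_cons_self .., h⟩
          · rcases List.mem_filter.mp hdm with ⟨hdm', hne⟩
            have hdc' : d ≠ c := by simpa [bne] using hne
            exact ⟨d, hdm', (count_filter_ne _ _ _ hdc') ▸ hdc⟩
      have hk : ∀ m : Nat,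
          (((c :: t).length - ((c :: t).filter (fun x => x != c)).length) == m) =
            decide ((c :: t).count c = m) := by
        intro m
        rw [length_sub_filter]
        rcases h : (c :: t).count c == m with _ | _ <;> simp at h <;> simp [h]
      refine Prod.ext ?_ ?_ <;>
      · simp only [hk, hmem, decide_or_eq_or_decide, Bool.or_assoc]
set_option maxRecDepth 4000 in
theorem scanId_spec : Claim_equal_scanId := by
  intro id _
  unfold Spec_scanId scanId scanId_alt
  simp only [scanId_occ_eq_counter, scanId_any_eq]
  rw [scanIdGo_eq]
  simp only [Bool.false_or]
  have hcast : ∀ (xs : List Char) (m : Nat),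
      (∃ c ∈ xs, (xs.count c : Int) = (m : Int)) ↔ (∃ c ∈ xs, xs.count c = m) := by
    intro xs m
    constructor <;> rintro ⟨c, hc, h⟩ <;> exact ⟨c, hc, by exact_mod_cast h⟩
  have h2 : ((2 : Int)) = ((2 : Nat) : Int) := rfl
  have h3 : ((3 : Int)) = ((3 : Nat) : Int) := rfl
  rw [h2, h3, decide_eq_decide.mpr (hcast _ 2), decide_eq_decide.mpr (hcast _ 3)]
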